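-- pv_equiv track=rewrite | github.com/hazerMf/Code-Ptit | BT/ki22324/PY01056.py | chk
-- ===== SOURCE A (Python) =====
-- def ele(num):
--     for i in range(2,num,1):
--         if num%i==0:
--             return False
--     return True
--
-- def chk(n):
--     s = 0
--     for i in range(len(n)):
--         if i%2!=int(n[i])%2:
--             return False
--         s += int(n[i])
--     if ele(s):
--         return True
--     return False
-- ===== SOURCE B (Python) =====
-- def chk(n):
--     if any(int(c) % 2 != i % 2 for i, c in enumerate(n)):
--         return False
--     s = sum(int(c) for c in n)
--     i = 2
--     while i * i <= s:
--         if s % i == 0: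
--             return False
--         i += 1
--     return True
-- ===== Notes on version B (the rewrite author's own statement) =====
-- stated objective: alternative
-- what changed: The O(s) trial-division primality helper over range(2,s) is replaced by a while loop bounded by i*i<=s, and the single early-return index loop is split into an any() parity pass plus a sum() pass.
import Mathlib
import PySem

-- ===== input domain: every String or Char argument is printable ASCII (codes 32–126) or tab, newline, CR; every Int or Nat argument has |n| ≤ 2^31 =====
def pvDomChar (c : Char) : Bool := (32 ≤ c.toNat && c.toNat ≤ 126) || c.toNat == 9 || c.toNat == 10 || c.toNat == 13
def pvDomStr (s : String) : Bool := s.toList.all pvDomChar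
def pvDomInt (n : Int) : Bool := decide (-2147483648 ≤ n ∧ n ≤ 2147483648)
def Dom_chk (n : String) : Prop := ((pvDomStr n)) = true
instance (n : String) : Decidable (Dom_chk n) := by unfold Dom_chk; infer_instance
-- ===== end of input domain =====

-- B replaces A's O(s) trial division over range(2,s) by a √s-bounded while loop, and splits
-- the single early-return scan into an any() parity pass plus a sum() pass (objective: alternative).

-- ===== PORT A =====
-- ele: for i in range(2,num,1): if num%i==0: return False / return True
def eleGo (num : Int) : List Int → Bool
  | [] => true
  | i :: rest => if PySem.Int.mod num i == 0 then false else eleGo num rest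

def ele (num : Int) : Bool := eleGo num (PySem.List.pyRange 2 num 1)

-- the loop 'for i in range(len(n)): …' of chk, walking the characters with their index i;
-- int(n[i]) is PySem.Int.ofChars? [c] (none = ValueError, excluded by Pre_chk; .getD 0 totalises)
def chkGo : List Char → Int → Int → Bool
  | [], _, s => if ele s then true else false
  | c :: cs, i, s =>
      if PySem.Int.mod i 2 != PySem.Int.mod ((PySem.Int.ofChars? [c]).getD 0) 2 then false
      else chkGo cs (i + 1) (s + (PySem.Int.ofChars? [c]).getD 0)

def chk (n : String) : Bool := chkGo n.toList 0 0

-- ===== PORT B =====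
-- any(int(c) % 2 != i % 2 for i, c in enumerate(n))
def anyBad : List Char → Int → Bool
  | [], _ => false
  | c :: cs, i =>
      (PySem.Int.mod ((PySem.Int.ofChars? [c]).getD 0) 2 != PySem.Int.mod i 2) || anyBad cs (i + 1)

-- s = sum(int(c) for c in n)
def digitSum (cs : List Char) : Int := (cs.map (fun c => (PySem.Int.ofChars? [c]).getD 0)).sum

-- i = 2; while i*i <= s: if s % i == 0: return False; i += 1 / return True
def primeLoop (s i : Int) : Bool :=
  if i * i ≤ s then
    (if PySem.Int.mod s i == 0 then false else primeLoop s (i + 1))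
  else true
termination_by (s + 2 - i).toNat
decreasing_by
  rename_i h1 _h2
  have h0 : 0 ≤ i * i := mul_self_nonneg i
  rcases le_or_gt i 0 with hi | hi
  · have : 0 ≤ s := le_trans h0 h1
    omega
  · have : i * 1 ≤ i * i := by
      apply mul_le_mul_of_nonneg_left (by omega) (by omega)
    omega

def chk_alt (n : String) : Bool :=
  if anyBad n.toList 0 then false else primeLoop (digitSum n.toList) 2

-- ===== PRECONDITION & SPEC =====
-- Pre_chk: Python's A raises ValueError at the first index j it actually reaches (all earlier
-- characters were digits whose parity matched their index) whose character is not a digit;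
-- exactly those inputs are excluded.
def Pre_chk (n : String) : Prop :=
  ∀ j : Nat, j < n.toList.length →
    (∀ m : Nat, m < j → ((n.toList[m]!).isDigit = true ∧ (n.toList[m]!).toNat % 2 = m % 2)) →
    (n.toList[j]!).isDigit = true
instance (n : String) : Decidable (Pre_chk n) := by unfold Pre_chk; infer_instance

def pvWitness_chk : String := "21"

def Spec_chk (n : String) (out : Bool) : Prop := out = chk_alt n
instance (n : String) (out : Bool) : Decidable (Spec_chk n out) := by unfold Spec_chk; infer_instance

-- ===== CLAIM (what is proved, stated in full; the proofs are below) =====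
def Claim_equal_chk : Prop := ∀ (n : String), Dom_chk n → Pre_chk n → Spec_chk n (chk n)

-- ===== LEMMAS AND PROOFS =====

theorem digit_val (c : Char) (h : c.isDigit = true) :
    PySem.Int.ofChars? [c] = some ((c.toNat : Int) - 48) := by
  have hb : 48 ≤ c.toNat ∧ c.toNat ≤ 57 := by
    simp [Char.isDigit, UInt32.le_iff_toNat_le] at h
    exact ⟨h.1, h.2⟩
  have hc : Char.ofNat c.toNat = c := Char.ofNat_toNat c
  have h10 : c.toNat = 48 ∨ c.toNat = 49 ∨ c.toNat = 50 ∨ c.toNat = 51 ∨ c.toNat = 52 ∨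
      c.toNat = 53 ∨ c.toNat = 54 ∨ c.toNat = 55 ∨ c.toNat = 56 ∨ c.toNat = 57 := by omega
  rcases h10 with h|h|h|h|h|h|h|h|h|h <;> rw [← hc, h] <;> decide

-- reachability predicate of the scan, structurally
def preL : List Char → Nat → Prop
  | [], _ => True
  | c :: cs, k => c.isDigit = true ∧ ((c.toNat % 2 = k % 2) → preL cs (k + 1))

theorem pre_shift (cs : List Char) :
    ∀ k : Nat,
      (∀ j : Nat, j < cs.length →
        (∀ m : Nat, m < j → ((cs[m]!).isDigit = true ∧ (cs[m]!).toNat % 2 = (m + k) % 2)) →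
        (cs[j]!).isDigit = true) →
      preL cs k := by
  induction cs with
  | nil => intro k _; trivial
  | cons c cs ih =>
      intro k H
      constructor
      · have := H 0 (by simp) (by omega)
        simpa using this
      · intro hp
        apply ih (k + 1)
        intro j hj Hm
        have := H (j + 1) (by simpa using Nat.succ_lt_succ hj) ?_
        · simpa using this
        · intro m hm
          cases m with
          | zero =>
              refine ⟨?_, ?_⟩
              · have := H 0 (by simp) (by omega)
                simpa using this
              · simpa using hp
          | succ m' =>
              have := Hm m' (by omega)
              simpa [Nat.add_assoc, Nat.add_comm 1 k] using this

theorem pre_preL (n : String) (h : Pre_chk n) : preL n.toList 0 := by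
  apply pre_shift n.toList 0
  intro j hj Hm
  exact h j hj (by simpa using Hm)

theorem eleGo_iff (l : List Int) (num : Int) :
    eleGo num l = true ↔ ∀ i ∈ l, ¬ i ∣ num := by
  induction l with
  | nil => simp [eleGo]
  | cons x l ih =>
      by_cases hx : PySem.Int.mod num x = 0
      · have : x ∣ num := (PySem.Int.mod_eq_zero_iff_dvd num x).mp hx
        simp [eleGo, hx, this]
      · simp [eleGo, hx, ih]
        intro _
        exact fun hd => hx ((PySem.Int.mod_eq_zero_iff_dvd num x).mpr hd)

theorem primeLoop_iff (K : Nat) :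
    ∀ s i : Int, 0 ≤ i → (s + 2 - i).toNat ≤ K →
      (primeLoop s i = true ↔ ∀ d : Int, i ≤ d → d * d ≤ s → ¬ d ∣ s) := by
  induction K with
  | zero =>
      intro s i hi hK
      rw [primeLoop.eq_def]
      have hlt : ¬ (i * i ≤ s) := by
        intro h
        have : i * 1 ≤ i * i := by
          rcases eq_or_lt_of_le hi with h0 | h0
          · nlinarith
          · exact mul_le_mul_of_nonneg_left (by omega) (by omega)
        omega
      simp only [if_neg hlt]
      constructor
      · intro _ d hd hdd hdvd
        have : i * i ≤ d * d := mul_self_le_mul_self hi hd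
        omega
      · intro _; trivial
  | succ K ih =>
      intro s i hi hK
      rw [primeLoop.eq_def]
      by_cases hle : i * i ≤ s
      · simp only [if_pos hle]
        by_cases hz : PySem.Int.mod s i = 0
        · have hdvd : i ∣ s := (PySem.Int.mod_eq_zero_iff_dvd s i).mp hz
          have hfalse : (if (PySem.Int.mod s i == 0) = true then false else primeLoop s (i + 1)) = false := by
            rw [hz]; rfl
          rw [hfalse]
          simp only [Bool.false_eq_true, false_iff]
          intro h
          exact h i le_rfl hle hdvd
        · have hndvd : ¬ i ∣ s := fun hd => hz ((PySem.Int.mod_eq_zero_iff_dvd s i).mpr hd)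
          have hrec := ih s (i + 1) (by omega) (by omega)
          simp only [beq_iff_eq, hz, if_false, hrec]
          constructor
          · intro h d hd hdd
            rcases eq_or_lt_of_le hd with h0 | h0
            · rw [← h0]; exact hndvd
            · exact h d (by omega) hdd
          · intro h d hd hdd
            exact h d (by omega) hdd
      · simp only [if_neg hle]
        constructor
        · intro _ d hd hdd hdvd
          have : i * i ≤ d * d := mul_self_le_mul_self hi hd
          omega
        · intro _; trivial

-- the √-bound is complete: a composite s has a divisor d with d*d ≤ s
theorem divisor_bridge (s : Int) (hs : 0 ≤ s) :
    (∀ i : Int, 2 ≤ i → i < s → ¬ i ∣ s) ↔ (∀ d : Int, 2 ≤ d → d * d ≤ s → ¬ d ∣ s) := by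
  constructor
  · intro H d hd hdd hdvd
    have hlt : d < s := by nlinarith
    exact H d hd hlt hdvd
  · intro H i hi hlt hdvd
    obtain ⟨e, he⟩ := hdvd
    have hipos : 0 < i := by omega
    have he2 : 2 ≤ e := by nlinarith
    rcases le_total i e with hie | hei
    · exact H i hi (by nlinarith) ⟨e, he⟩
    · exact H e he2 (by nlinarith) ⟨i, by rw [he, mul_comm]⟩

theorem ele_eq_primeLoop (s : Int) (hs : 0 ≤ s) : ele s = primeLoop s 2 := by
  rw [Bool.eq_iff_iff, ele, eleGo_iff, primeLoop_iff ((s + 2 - 2).toNat) s 2 (by omega) le_rfl]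
  constructor
  · intro H d hd hdd
    exact (divisor_bridge s hs).mp (fun i hi hlt => H i (PySem.List.mem_pyRange_one.mpr ⟨hi, hlt⟩)) d hd hdd
  · intro H i hmem
    obtain ⟨h2, hlt⟩ := PySem.List.mem_pyRange_one.mp hmem
    exact (divisor_bridge s hs).mpr H i h2 hlt

theorem main_loop (cs : List Char) :
    ∀ (k : Nat) (s : Int), 0 ≤ s → preL cs k →
      chkGo cs (k : Int) s = (if anyBad cs (k : Int) then false else primeLoop (s + digitSum cs) 2) := by
  induction cs with
  | nil =>
      intro k s hs _
      simp only [chkGo, anyBad, digitSum, List.map_nil, List.sum_nil, add_zero, if_false,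
        Bool.false_eq_true]
      rw [ele_eq_primeLoop s hs]
      cases primeLoop s 2 <;> rfl
  | cons c cs ih =>
      intro k s hs hpre
      obtain ⟨hdig, hrest⟩ := hpre
      have hb : 48 ≤ c.toNat ∧ c.toNat ≤ 57 := by
        simp [Char.isDigit, UInt32.le_iff_toNat_le] at hdig
        exact ⟨hdig.1, hdig.2⟩
      have hval := digit_val c hdig
      have hd0 : ((PySem.Int.ofChars? [c]).getD 0) = ((c.toNat : Int) - 48) := by
        rw [hval]; rfl
      have hmodi : PySem.Int.mod (k : Int) 2 = ((k % 2 : Nat) : Int) := by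
        exact_mod_cast PySem.Int.mod_natCast k 2
      have hmodd : PySem.Int.mod ((c.toNat : Int) - 48) 2 = (((c.toNat) % 2 : Nat) : Int) := by
        have h48 : ((c.toNat : Int) - 48) = ((c.toNat - 48 : Nat) : Int) := by omega
        have h1 : PySem.Int.mod ((c.toNat - 48 : Nat) : Int) ((2 : Nat) : Int)
            = (((c.toNat - 48) % 2 : Nat) : Int) := PySem.Int.mod_natCast (c.toNat - 48) 2
        rw [h48]
        have h2 : ((2 : Nat) : Int) = (2 : Int) := by norm_num
        rw [← h2, h1]
        congr 1
        omega
      by_cases hp : c.toNat % 2 = k % 2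
      · have hAc : (PySem.Int.mod (k : Int) 2 != PySem.Int.mod ((PySem.Int.ofChars? [c]).getD 0) 2) = false := by
          rw [hd0, hmodi, hmodd, hp, bne_self_eq_false]
        have hBc : (PySem.Int.mod ((PySem.Int.ofChars? [c]).getD 0) 2 != PySem.Int.mod (k : Int) 2) = false := by
          rw [hd0, hmodi, hmodd, hp, bne_self_eq_false]
        have hstep : ((k : Int) + 1) = ((k + 1 : Nat) : Int) := by push_cast; ring
        simp only [chkGo, anyBad, hAc, hBc, Bool.false_or, Bool.false_eq_true, if_false]
        rw [hstep, ih (k + 1) (s + (PySem.Int.ofChars? [c]).getD 0) (by rw [hd0]; omega) (hrest hp)]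
        have hsum : s + (PySem.Int.ofChars? [c]).getD 0 + digitSum cs = s + digitSum (c :: cs) := by
          simp only [digitSum, List.map_cons, List.sum_cons]
          ring
        rw [hsum]
      · have hne : ((k % 2 : Nat) : Int) ≠ (((c.toNat) % 2 : Nat) : Int) := by
          intro h; exact hp (by exact_mod_cast h.symm)
        have hAc : (PySem.Int.mod (k : Int) 2 != PySem.Int.mod ((PySem.Int.ofChars? [c]).getD 0) 2) = true := by
          rw [hd0, hmodi, hmodd]
          exact bne_iff_ne.mpr hne
        have hBc : (PySem.Int.mod ((PySem.Int.ofChars? [c]).getD 0) 2 != PySem.Int.mod (k : Int) 2) = true := by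
          rw [hd0, hmodi, hmodd]
          exact bne_iff_ne.mpr hne.symm
        simp only [chkGo, anyBad, hAc, hBc, Bool.true_or, if_true]

-- ===== VERDICT (by name: the statement is the Claim_ definition above) =====
theorem chk_spec : Claim_equal_chk := by
  intro n _ hpre
  unfold Spec_chk chk chk_alt
  have := main_loop n.toList 0 0 le_rfl (pre_preL n hpre)
  simpa using this
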